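-- pv_equiv track=rewrite | github.com/treenoder/ALGLB | Olymp/E/main.py | solution
-- ===== SOURCE A (Python) =====
-- def solution(s, arr: list) -> int:
--     original_total = sum(arr)
--     mn = min(arr)
--     mx = max(arr)
--     for last in range(101):
--         total = original_total + last
--         new_min = min(mn, last)
--         new_max = max(mx, last)
--         final = total - new_min - new_max
--         if final >= s:
--             return last
--     return -1
-- ===== SOURCE B (Python) =====
-- def solution(s, arr: list) -> int:
--     original_total = sum(arr)
--     mn = min(arr)
--     mx = max(arr)
--
--     def ok(last):
--         return original_total + last - min(mn, last) - max(mx, last) >= s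
--
--     # ok is non-decreasing in last, so binary-search the smallest last in [0, 100]
--     if not ok(100):
--         return -1
--     lo, hi = 0, 100
--     while lo < hi:
--         mid = (lo + hi) // 2
--         if ok(mid):
--             hi = mid
--         else:
--             lo = mid + 1
--     return lo
-- ===== Notes on version B (the rewrite author's own statement) =====
-- stated objective: alternative
-- what changed: Replaces the linear scan over all 101 candidate last values by a binary search for the smallest last satisfying the (monotone) adjusted-sum predicate, with -1 when even last=100 fails.
import Mathlib
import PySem

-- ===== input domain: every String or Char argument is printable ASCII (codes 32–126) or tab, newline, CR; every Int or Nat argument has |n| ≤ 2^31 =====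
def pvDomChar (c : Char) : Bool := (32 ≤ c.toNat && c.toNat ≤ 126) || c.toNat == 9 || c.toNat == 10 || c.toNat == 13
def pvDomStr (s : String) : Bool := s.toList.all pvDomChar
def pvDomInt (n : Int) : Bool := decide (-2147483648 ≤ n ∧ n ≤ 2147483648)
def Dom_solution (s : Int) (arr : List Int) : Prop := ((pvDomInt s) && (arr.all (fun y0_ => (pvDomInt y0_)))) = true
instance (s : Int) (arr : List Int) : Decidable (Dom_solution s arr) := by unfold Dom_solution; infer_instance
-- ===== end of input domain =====

-- B replaces A's linear scan over last = 0..100 by a binary search for the smallest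
-- last satisfying the (monotone) adjusted-sum predicate (objective: alternative).

-- ===== PORT A =====
-- the 'for last in range(101): … return last' loop (return ⇒ stop; fall-through ⇒ -1)
def solutionLoopA (s ot mn mx : Int) : List Int → Int
  | [] => -1
  | last :: rest =>
    let total := ot + last
    let new_min := min mn last
    let new_max := max mx last
    let final := total - new_min - new_max
    if final ≥ s then last else solutionLoopA s ot mn mx rest

def solution (s : Int) (arr : List Int) : Int :=
  let original_total := arr.foldl (· + ·) 0
  let mn := (PySem.List.min? arr (fun x => x)).getD 0   -- some under Pre_ (arr ≠ [])
  let mx := (PySem.List.max? arr (fun x => x)).getD 0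
  solutionLoopA s original_total mn mx (PySem.List.pyRange 0 101 1)

-- ===== PORT B =====
-- ok(last) of Source B
def okB (s ot mn mx last : Int) : Bool :=
  decide (ot + last - min mn last - max mx last ≥ s)

-- the 'while lo < hi' binary-search loop of Source B; the fuel only bounds the number of
-- iterations (hi - lo shrinks every turn, so 101 is never exhausted from lo=0, hi=100)
def bsearchB (s ot mn mx : Int) : Nat → Int → Int → Int
  | 0, lo, _ => lo
  | fuel + 1, lo, hi =>
    if lo < hi then
      let mid := PySem.Int.floordiv (lo + hi) 2
      if okB s ot mn mx mid then bsearchB s ot mn mx fuel lo mid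
      else bsearchB s ot mn mx fuel (mid + 1) hi
    else lo

def solution_alt (s : Int) (arr : List Int) : Int :=
  let original_total := arr.foldl (· + ·) 0
  let mn := (PySem.List.min? arr (fun x => x)).getD 0
  let mx := (PySem.List.max? arr (fun x => x)).getD 0
  if !(okB s original_total mn mx 100) then -1
  else bsearchB s original_total mn mx 101 0 100

-- ===== PRECONDITION & SPEC =====
-- Pre_ excludes only the empty list, on which A's min(arr) raises ValueError.
def Pre_solution (s : Int) (arr : List Int) : Prop := arr ≠ []
instance (s : Int) (arr : List Int) : Decidable (Pre_solution s arr) := by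
  unfold Pre_solution; infer_instance
def pvWitness_solution : Int × List Int := (3, [1, 2])

def Spec_solution (s : Int) (arr : List Int) (out : Int) : Prop := out = solution_alt s arr
instance (s : Int) (arr : List Int) (out : Int) : Decidable (Spec_solution s arr out) := by
  unfold Spec_solution; infer_instance

-- ===== CLAIM (what is proved, stated in full; the proofs are below) =====
def Claim_equal_solution : Prop := ∀ (s : Int) (arr : List Int), Dom_solution s arr → Pre_solution s arr → Spec_solution s arr (solution s arr)

-- ===== LEMMAS AND PROOFS =====

-- the predicate is monotone in last (needs mn ≤ mx)
theorem okB_mono (s ot mn mx : Int) (h : mn ≤ mx) {a b : Int} (hab : a ≤ b)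
    (ha : okB s ot mn mx a = true) : okB s ot mn mx b = true := by
  simp only [okB, decide_eq_true_eq] at ha ⊢; omega

-- A's loop returns -1 when the predicate is false on all of [a, b)
theorem loopA_none (s ot mn mx : Int) : ∀ (n : Nat) (a b : Int), (b - a).toNat = n →
    (∀ k, a ≤ k → k < b → okB s ot mn mx k = false) →
    solutionLoopA s ot mn mx (PySem.List.pyRange a b 1) = -1 := by
  intro n
  induction n with
  | zero =>
    intro a b hn _
    rw [PySem.List.pyRange_one_eq_nil (by omega)]
    rfl
  | succ m ih =>
    intro a b hn hall
    have hab : a < b := by omega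
    rw [PySem.List.pyRange_one_cons hab]
    have ha := hall a (le_refl a) hab
    simp only [okB, decide_eq_false_iff_not] at ha
    simp only [solutionLoopA, if_neg ha]
    exact ih (a + 1) b (by omega) (fun k hk1 hk2 => hall k (by omega) hk2)

-- A's loop returns the least r in [a, b) satisfying the predicate
theorem loopA_found (s ot mn mx : Int) : ∀ (n : Nat) (a b r : Int), (b - a).toNat = n →
    a ≤ r → r < b → okB s ot mn mx r = true →
    (∀ k, a ≤ k → k < r → okB s ot mn mx k = false) →
    solutionLoopA s ot mn mx (PySem.List.pyRange a b 1) = r := by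
  intro n
  induction n with
  | zero => intro a b r hn har hrb _ _; omega
  | succ m ih =>
    intro a b r hn har hrb hr hpre
    have hab : a < b := by omega
    rw [PySem.List.pyRange_one_cons hab]
    by_cases hra : r = a
    · subst hra
      simp only [okB, decide_eq_true_eq] at hr
      simp only [solutionLoopA, if_pos hr]
    · have ha := hpre a (le_refl a) (by omega)
      simp only [okB, decide_eq_false_iff_not] at ha
      simp only [solutionLoopA, if_neg ha]
      exact ih (a + 1) b r (by omega) (by omega) hrb hr
        (fun k hk1 hk2 => hpre k (by omega) hk2)

-- B's binary search finds the least point of a monotone predicate, given it holds at hi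
theorem bsearch_spec (s ot mn mx : Int) (hm : mn ≤ mx) : ∀ (fuel : Nat) (lo hi : Int),
    (hi - lo).toNat < fuel → lo ≤ hi → okB s ot mn mx hi = true →
    lo ≤ bsearchB s ot mn mx fuel lo hi ∧ bsearchB s ot mn mx fuel lo hi ≤ hi ∧
    okB s ot mn mx (bsearchB s ot mn mx fuel lo hi) = true ∧
    (∀ k, lo ≤ k → k < bsearchB s ot mn mx fuel lo hi → okB s ot mn mx k = false) := by
  intro fuel
  induction fuel with
  | zero => intro lo hi hn _ _; omega
  | succ f ih =>
    intro lo hi hn hlohi hhi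
    by_cases h : lo < hi
    · have hmid1 : lo ≤ PySem.Int.floordiv (lo + hi) 2 := by
        rw [PySem.Int.le_floordiv_iff_mul_le (by omega : (0:Int) < 2)]; omega
      have hmid2 : PySem.Int.floordiv (lo + hi) 2 < hi := by
        rw [PySem.Int.floordiv_lt_iff_lt_mul (by omega : (0:Int) < 2)]; omega
      rw [bsearchB]
      simp only [if_pos h]
      set mid := PySem.Int.floordiv (lo + hi) 2 with hmiddef
      by_cases hok : okB s ot mn mx mid = true
      · simp only [if_pos hok]
        have := ih lo mid (by omega) (by omega) hok
        exact ⟨this.1, by omega, this.2.2.1, this.2.2.2⟩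
      · simp only [if_neg hok]
        have := ih (mid + 1) hi (by omega) (by omega) hhi
        refine ⟨by omega, this.2.1, this.2.2.1, ?_⟩
        intro k hk1 hk2
        by_cases hkm : k ≤ mid
        · rcases Bool.eq_false_or_eq_true (okB s ot mn mx k) with ht | hf
          · exact absurd (okB_mono s ot mn mx hm hkm ht) hok
          · exact hf
        · exact this.2.2.2 k (by omega) hk2
    · have heq : lo = hi := by omega
      subst heq
      rw [bsearchB]
      simp only [if_neg h]
      exact ⟨le_refl lo, le_refl lo, hhi, fun k hk1 hk2 => by omega⟩

-- min ≤ max for a nonempty list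
theorem mn_le_mx (arr : List Int) (h : arr ≠ []) :
    (PySem.List.min? arr (fun x => x)).getD 0 ≤ (PySem.List.max? arr (fun x => x)).getD 0 := by
  obtain ⟨m, hm⟩ : ∃ m, PySem.List.min? arr (fun x => x) = some m := by
    cases hc : PySem.List.min? arr (fun x => x) with
    | none => exact absurd ((PySem.List.min?_eq_none_iff arr (fun x => x)).mp hc) h
    | some m => exact ⟨m, rfl⟩
  obtain ⟨M, hM⟩ : ∃ M, PySem.List.max? arr (fun x => x) = some M := by
    cases hc : PySem.List.max? arr (fun x => x) with
    | none => exact absurd ((PySem.List.max?_eq_none_iff arr (fun x => x)).mp hc) h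
    | some M => exact ⟨M, rfl⟩
  rw [hm, hM]
  simpa using PySem.List.max?_isMax hM m (PySem.List.min?_mem hm)

-- ===== VERDICT (by name: the statement is the Claim_ definition above) =====
theorem solution_spec : Claim_equal_solution := by
  intro s arr _ hpre
  unfold Spec_solution solution solution_alt
  set ot := arr.foldl (· + ·) 0 with hot
  set mn := (PySem.List.min? arr (fun x => x)).getD 0 with hmn
  set mx := (PySem.List.max? arr (fun x => x)).getD 0 with hmx
  have hmm : mn ≤ mx := mn_le_mx arr hpre
  by_cases h100 : okB s ot mn mx 100 = true
  · simp only [h100, Bool.not_true, Bool.false_eq_true, if_false]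
    obtain ⟨h1, h2, h3, h4⟩ :=
      bsearch_spec s ot mn mx hmm 101 0 100 (by omega) (by omega) h100
    exact loopA_found s ot mn mx ((101:Int) - 0).toNat 0 101 (bsearchB s ot mn mx 101 0 100)
      rfl h1 (by omega) h3 h4
  · have h100' : okB s ot mn mx 100 = false := by
      rcases Bool.eq_false_or_eq_true (okB s ot mn mx 100) with ht | hf
      · exact absurd ht h100
      · exact hf
    simp only [h100', Bool.not_false, if_true]
    apply loopA_none s ot mn mx ((101:Int) - 0).toNat 0 101 rfl
    intro k hk1 hk2
    rcases Bool.eq_false_or_eq_true (okB s ot mn mx k) with ht | hf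
    · exact absurd (okB_mono s ot mn mx hmm (by omega : k ≤ 100) ht) h100
    · exact hf
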